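-- pv_equiv track=rewrite | github.com/c0ntradicti0n/pdfetc2txt | bio_annotation.py | not_between
-- ===== SOURCE A (Python) =====
-- def not_between(annotation):
--     start = 0
--     for tok, tag in annotation:
--         if tag== 'O':
--             start+=1
--         else:
--             break
--     stop = len(annotation)
--     for tok, tag in annotation[::-1]:
--         if tag=='O':
--             stop-=1
--         else:
--             break
--     return annotation[min([start, stop]): max([start,stop])]
-- ===== SOURCE B (Python) =====
-- def not_between(annotation):
--     nonO = [i for i, (tok, tag) in enumerate(annotation) if tag != 'O']
--     if not nonO:
--         return annotation[:]
--     return annotation[nonO[0]:nonO[-1] + 1]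
-- ===== Notes on version B (the rewrite author's own statement) =====
-- stated objective: simpler
-- what changed: Replaces the two directional break-scans (forward and over the reversed list) plus min/max slice arithmetic with a single pass collecting the indices of non-'O' tokens and one direct slice nonO[0]:nonO[-1]+1 (whole copy when there is no non-'O' token).
import Mathlib
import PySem

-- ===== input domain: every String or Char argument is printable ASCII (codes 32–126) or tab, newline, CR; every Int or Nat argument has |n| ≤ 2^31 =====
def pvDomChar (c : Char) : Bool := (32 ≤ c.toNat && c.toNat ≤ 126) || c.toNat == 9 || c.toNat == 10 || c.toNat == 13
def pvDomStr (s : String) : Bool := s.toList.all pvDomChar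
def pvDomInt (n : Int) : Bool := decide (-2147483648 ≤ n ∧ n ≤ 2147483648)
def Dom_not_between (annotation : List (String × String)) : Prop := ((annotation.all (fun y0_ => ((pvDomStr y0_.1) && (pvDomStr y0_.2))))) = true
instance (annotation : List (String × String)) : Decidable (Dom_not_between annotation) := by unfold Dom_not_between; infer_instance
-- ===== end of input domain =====

-- B trims the leading/trailing 'O'-tagged tokens with one index-collecting pass and a single
-- slice instead of A's two directional break-scans with min/max slice arithmetic (objective: simpler).

-- ===== PORT A =====
-- A's first loop: start = 0; for tok, tag in annotation: if tag == 'O': start += 1 else: break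
def nbStartLoop : List (String × String) → Int → Int
  | [], s => s
  | (_, tag) :: rest, s => if tag == "O" then nbStartLoop rest (s + 1) else s

-- A's second loop: stop = len(annotation); for tok, tag in annotation[::-1]: if tag == 'O': stop -= 1 else: break
def nbStopLoop : List (String × String) → Int → Int
  | [], s => s
  | (_, tag) :: rest, s => if tag == "O" then nbStopLoop rest (s - 1) else s

def not_between (annotation : List (String × String)) : List (String × String) :=
  let start := nbStartLoop annotation 0
  let stop := nbStopLoop ((PySem.List.slice? annotation none none (-1)).getD []) (annotation.length : Int)
  PySem.List.slice annotation (some (min start stop)) (some (max start stop))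

-- ===== PORT B =====
-- B: nonO = [i for i, (tok, tag) in enumerate(annotation) if tag != 'O'];
--    return annotation[:] if nonO is empty else annotation[nonO[0]:nonO[-1] + 1]
def not_between_alt (annotation : List (String × String)) : List (String × String) :=
  let nonO := ((PySem.List.enumerate annotation).filter (fun p => p.2.2 != "O")).map (·.1)
  match nonO.head?, nonO.getLast? with
  | some i, some j => PySem.List.slice annotation (some i) (some (j + 1))
  | _, _ => PySem.List.slice annotation none none

-- ===== PRECONDITION & SPEC =====
def Spec_not_between (annotation : List (String × String)) (out : List (String × String)) : Prop := out = not_between_alt annotation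
instance (annotation : List (String × String)) (out : List (String × String)) : Decidable (Spec_not_between annotation out) := by unfold Spec_not_between; infer_instance

-- ===== CLAIM (what is proved, stated in full; the proofs are below) =====
def Claim_equal_not_between : Prop := ∀ (annotation : List (String × String)), Dom_not_between annotation → Spec_not_between annotation (not_between annotation)

-- ===== LEMMAS AND PROOFS =====

-- the tag test both programs make
def nbO : String × String → Bool := fun p => p.2 == "O"

-- B's index list, with a general enumerate start for induction
def nbNonO (a : List (String × String)) (s : Int) : List Int :=
  ((PySem.List.enumerate a s).filter (fun p => p.2.2 != "O")).map (·.1)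

lemma nbStartLoop_eq (a : List (String × String)) (s : Int) :
    nbStartLoop a s = s + ((a.takeWhile nbO).length : Int) := by
  induction a generalizing s with
  | nil => simp [nbStartLoop]
  | cons x xs ih =>
    obtain ⟨tok, tag⟩ := x
    by_cases h : tag == "O" <;> first
      | simp [nbStartLoop, List.takeWhile, nbO, h, ih]; omega
      | simp [nbStartLoop, List.takeWhile, nbO, h]

lemma nbStopLoop_eq (a : List (String × String)) (s : Int) :
    nbStopLoop a s = s - ((a.takeWhile nbO).length : Int) := by
  induction a generalizing s with
  | nil => simp [nbStopLoop]
  | cons x xs ih =>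
    obtain ⟨tok, tag⟩ := x
    by_cases h : tag == "O" <;> first
      | simp [nbStopLoop, List.takeWhile, nbO, h, ih]; omega
      | simp [nbStopLoop, List.takeWhile, nbO, h]

lemma nbNonO_nil (a : List (String × String)) (s : Int) (h : a.all nbO) : nbNonO a s = [] := by
  induction a generalizing s with
  | nil => simp [nbNonO, PySem.List.enumerate_nil]
  | cons x xs ih =>
    obtain ⟨tok, tag⟩ := x
    rw [List.all_cons, Bool.and_eq_true] at h
    have htag : tag = "O" := by simpa [nbO] using h.1
    have h1 : nbNonO ((tok, tag) :: xs) s = nbNonO xs (s + 1) := by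
      simp [nbNonO, PySem.List.enumerate_cons, htag]
    rw [h1]
    exact ih (s + 1) h.2

lemma nbNonO_head (a : List (String × String)) (s : Int) (h : ¬ a.all nbO) :
    (nbNonO a s).head? = some (s + ((a.takeWhile nbO).length : Int)) := by
  induction a generalizing s with
  | nil => simp at h
  | cons x xs ih =>
    obtain ⟨tok, tag⟩ := x
    by_cases hx : tag = "O"
    · have hxs : ¬ xs.all nbO := by simpa [nbO, hx] using h
      have h1 : nbNonO ((tok, tag) :: xs) s = nbNonO xs (s + 1) := by
        simp [nbNonO, PySem.List.enumerate_cons, hx]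
      rw [h1, ih (s + 1) hxs]
      simp [List.takeWhile, nbO, hx]
      omega
    · have hb : (tag == "O") = false := by simp [hx]
      simp [nbNonO, PySem.List.enumerate_cons, hb, List.takeWhile, nbO]
      exact ⟨tok, tag, Or.inl ⟨hx, rfl, rfl⟩⟩

lemma nbEnumerate_append (a b : List (String × String)) (s : Int) :
    PySem.List.enumerate (a ++ b) s = PySem.List.enumerate a s ++ PySem.List.enumerate b (s + a.length) := by
  induction a generalizing s with
  | nil => simp [PySem.List.enumerate_nil]
  | cons x xs ih =>
    simp [PySem.List.enumerate_cons, ih]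
    ring_nf

lemma nbNonO_getLast (a : List (String × String)) (s : Int) (h : ¬ a.all nbO) :
    (nbNonO a s).getLast? = some (s + (a.length : Int) - ((a.reverse.takeWhile nbO).length : Int) - 1) := by
  induction a using List.reverseRecOn generalizing s with
  | nil => simp at h
  | append_singleton b x ih =>
    obtain ⟨tok, tag⟩ := x
    by_cases hx : tag = "O"
    · have hbO : ¬ b.all nbO := by
        intro hb; exact h (by simp [List.all_append, hb, nbO, hx])
      have h1 : nbNonO (b ++ [(tok, tag)]) s = nbNonO b s := by
        simp [nbNonO, nbEnumerate_append, PySem.List.enumerate_cons, PySem.List.enumerate_nil,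
          List.filter_append, hx]
      rw [h1, ih s hbO]
      have hb2 : (tag == "O") = true := by simp [hx]
      simp [nbO, hb2]
      omega
    · have hb : (tag == "O") = false := by simp [hx]
      have h1 : nbNonO (b ++ [(tok, tag)]) s = nbNonO b s ++ [s + b.length] := by
        simp [nbNonO, nbEnumerate_append, PySem.List.enumerate_cons, PySem.List.enumerate_nil,
          List.filter_append, hx]
      rw [h1]
      simp [nbO, hb]
      omega

lemma nbAfter_takeWhile {α : Type} (p : α → Bool) (l : List α)
    (h : (l.takeWhile p).length < l.length) :
    p (l[(l.takeWhile p).length]'h) = false := by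
  induction l with
  | nil => simp at h
  | cons x xs ih =>
    by_cases hx : p x
    · have htw : (x :: xs).takeWhile p = x :: xs.takeWhile p := by simp [List.takeWhile, hx]
      simp only [htw, List.length_cons, List.getElem_cons_succ]
      exact ih (by simpa [htw] using h)
    · have htw : (x :: xs).takeWhile p = [] := by simp [hx]
      simp only [htw, List.length_nil, List.getElem_cons_zero]
      simp [hx]

lemma nbIn_takeWhile {α : Type} (p : α → Bool) (l : List α) (i : Nat)
    (hi : i < (l.takeWhile p).length) :
    p (l[i]'(lt_of_lt_of_le hi (List.takeWhile_prefix p).length_le)) = true := by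
  have hpre := List.takeWhile_prefix (l := l) p
  have hmem := List.mem_takeWhile_imp (l := l) (p := p) (List.getElem_mem hi)
  rwa [hpre.getElem hi] at hmem

lemma nbTakeWhile_lt (a : List (String × String)) (h : ¬ a.all nbO) :
    (a.takeWhile nbO).length < a.length := by
  have hpre := List.takeWhile_prefix (l := a) nbO
  have hne : a.takeWhile nbO ≠ a := by
    intro he
    exact h (by
      simp only [List.all_eq_true]
      intro x hx
      exact List.mem_takeWhile_imp (he ▸ hx))
  have hlen : (a.takeWhile nbO).length ≠ a.length := fun he => hne (hpre.eq_of_length he)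
  have := hpre.length_le
  omega

-- first non-'O' index precedes the last one: the two trims never overlap
lemma nbTakeWhile_bound (a : List (String × String)) (h : ¬ a.all nbO) :
    (a.takeWhile nbO).length + (a.reverse.takeWhile nbO).length < a.length := by
  have hrev : ¬ a.reverse.all nbO := by simpa using h
  have hk := nbTakeWhile_lt a h
  have hm := nbTakeWhile_lt a.reverse hrev
  rw [List.length_reverse] at hm
  by_contra hcon
  have hcon' : a.length ≤ (a.takeWhile nbO).length + (a.reverse.takeWhile nbO).length :=
    Nat.le_of_not_lt hcon
  set k := (a.takeWhile nbO).length
  set m := (a.reverse.takeWhile nbO).length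
  have hj : a.length - 1 - m < k := by omega
  have h1 : nbO (a[a.length - 1 - m]'(by omega)) = true := nbIn_takeWhile nbO a _ hj
  have h2 : nbO (a[a.length - 1 - m]'(by omega)) = false := by
    have := nbAfter_takeWhile nbO a.reverse (by rw [List.length_reverse]; exact hm)
    rwa [List.getElem_reverse] at this
  rw [h1] at h2
  simp at h2

-- ===== VERDICT (by name: the statement is the Claim_ definition above) =====
theorem not_between_spec : Claim_equal_not_between := by
  intro a _
  unfold Spec_not_between not_between not_between_alt
  rw [PySem.List.slice?_none_none_neg_one]
  simp only [Option.getD_some, nbStartLoop_eq, nbStopLoop_eq]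
  have hB : ((PySem.List.enumerate a).filter (fun p => p.2.2 != "O")).map (·.1) = nbNonO a 0 := rfl
  by_cases h : a.all nbO
  · have h1 : a.takeWhile nbO = a := List.takeWhile_eq_self_iff.mpr (by
      intro x hx; exact (List.all_eq_true.mp h) x hx)
    have h2 : a.reverse.takeWhile nbO = a.reverse := List.takeWhile_eq_self_iff.mpr (by
      intro x hx; exact (List.all_eq_true.mp h) x (List.mem_reverse.mp hx))
    rw [hB, nbNonO_nil a 0 h]
    simp only [List.head?_nil, List.getLast?_nil, h1, h2, List.length_reverse]
    have hmin : min (0 + (a.length : Int)) ((a.length : Int) - (a.length : Int)) = 0 := by omega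
    have hmax : max (0 + (a.length : Int)) ((a.length : Int) - (a.length : Int)) = (a.length : Int) := by omega
    rw [hmin, hmax, PySem.List.slice_toNat a (by omega) (by omega)]
    simp [PySem.List.slice]
  · have hk := nbTakeWhile_bound a h
    rw [hB, nbNonO_head a 0 h, nbNonO_getLast a 0 h]
    have hmin : min (0 + ((a.takeWhile nbO).length : Int))
        ((a.length : Int) - ((a.reverse.takeWhile nbO).length : Int)) =
        0 + ((a.takeWhile nbO).length : Int) := by omega
    have hmax : max (0 + ((a.takeWhile nbO).length : Int))
        ((a.length : Int) - ((a.reverse.takeWhile nbO).length : Int)) =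
        (0 + (a.length : Int) - ((a.reverse.takeWhile nbO).length : Int) - 1) + 1 := by omega
    rw [hmin, hmax]
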